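-- pv_equiv track=rewrite | github.com/kjh42447/Algorithm | 프로그래머스/LV1/소수 만들기.py | solution
-- ===== SOURCE A (Python) =====
-- import math
--
-- def solution(nums):
--     answer = 0
--     n = len(nums)
--     for i in range(n-2):
--         for j in range(i+1, n-1):
--             for k in range(j+1, n):
--                 if is_prime_number(nums[i]+nums[j]+nums[k]):
--                     answer += 1
--     return answer
--
-- def is_prime_number(x):
--     for i in range(2, int(math.sqrt(x)) + 1):
--         if x % i == 0:
--             return False
--     return True
-- ===== SOURCE B (Python) =====
-- import math
--
-- def _is_prime(x):
--     if x < 2: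
--         return False
--     for i in range(2, math.isqrt(x) + 1):
--         if x % i == 0:
--             return False
--     return True
--
-- def solution(nums):
--     answer = 0
--     pairs = []    # sums nums[i] + nums[j] over index pairs i < j seen so far
--     singles = []  # elements seen so far
--     for x in nums:
--         for s in pairs:
--             if _is_prime(s + x):
--                 answer += 1
--         pairs += [s + x for s in singles]
--         singles.append(x)
--     return answer
-- ===== Notes on version B (the rewrite author's own statement) =====
-- stated objective: alternative
-- what changed: Replaced the three nested index loops by a single left-to-right pass that maintains the list of pair sums seen so far and counts, for each new element, the prime-completing pairs; the prime test gets the standard x<2 guard instead of A's sqrt-range accident.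
-- intended difference: On lists (inside Pre_) having three distinct positions summing to 0 or 1, A's is_prime_number returns True for 0 and 1 (its trial range is empty) so A counts those triples, while B does not count them, which is intended since 0 and 1 are not prime. — e.g. on solution([0, 0, 0]): A returns 1, B returns 0
import Mathlib
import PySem

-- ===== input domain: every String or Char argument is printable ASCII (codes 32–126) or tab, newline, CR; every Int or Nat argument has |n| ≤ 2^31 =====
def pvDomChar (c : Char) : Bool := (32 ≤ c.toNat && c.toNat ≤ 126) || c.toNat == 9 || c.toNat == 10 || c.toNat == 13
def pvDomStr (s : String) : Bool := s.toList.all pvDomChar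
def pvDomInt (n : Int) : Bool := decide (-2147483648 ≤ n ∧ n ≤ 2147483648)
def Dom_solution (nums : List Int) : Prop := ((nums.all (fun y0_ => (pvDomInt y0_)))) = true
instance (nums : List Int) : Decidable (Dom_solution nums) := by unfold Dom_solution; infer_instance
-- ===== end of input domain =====

-- B replaces A's three nested index loops by one pass that keeps the pair sums seen so far,
-- and gives the trial-division prime test the standard x < 2 guard (A's test accepts 0 and 1).

-- ===== PORT A =====
-- is_prime_number: 'for i in range(2, int(math.sqrt(x))+1): if x % i == 0: return False / return True'.
-- The loop with its early return is `all`; int(math.sqrt(x)) = Nat.sqrt x.toNat exactly for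
-- 0 ≤ x ≤ 3*2^31 < 2^52 (the sums reachable under Dom_solution); for x < 0 Python raises
-- ValueError, which Pre_solution excludes.
def isPrimeA (x : Int) : Bool :=
  (PySem.List.pyRange 2 ((Nat.sqrt x.toNat : Int) + 1) 1).all
    (fun i => !(PySem.Int.mod x i == 0))

def solution (nums : List Int) : Int :=
  let n : Int := PySem.List.len nums
  (PySem.List.pyRange 0 (n - 2) 1).foldl (fun ans i =>
    (PySem.List.pyRange (i + 1) (n - 1) 1).foldl (fun ans j =>
      (PySem.List.pyRange (j + 1) n 1).foldl (fun ans k =>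
        if isPrimeA (PySem.List.pyGetD nums i 0 + PySem.List.pyGetD nums j 0
                      + PySem.List.pyGetD nums k 0)
        then ans + 1 else ans) ans) ans) 0

-- ===== PORT B =====
-- _is_prime: 'return x >= 2 and all(x % i != 0 for i in range(2, math.isqrt(x) + 1))'
def isPrimeB (x : Int) : Bool :=
  decide (2 ≤ x) && (PySem.List.pyRange 2 ((Nat.sqrt x.toNat : Int) + 1) 1).all
    (fun i => !(PySem.Int.mod x i == 0))

-- one pass over nums with state (answer, pairs, singles)
def solution_alt (nums : List Int) : Int :=
  (nums.foldl
    (fun (st : Int × List Int × List Int) x =>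
      (st.2.1.foldl (fun a s => if isPrimeB (s + x) then a + 1 else a) st.1,
       st.2.1 ++ st.2.2.map (fun s => s + x),
       st.2.2 ++ [x]))
    (0, [], [])).1

-- ===== PRECONDITION & SPEC =====
-- Pre_solution excludes exactly the inputs on which A raises: is_prime_number calls
-- math.sqrt on a triple sum, and math.sqrt raises ValueError on a negative argument.
def Pre_solution (nums : List Int) : Prop := ∀ t ∈ nums.sublistsLen 3, 0 ≤ t.sum
instance (nums : List Int) : Decidable (Pre_solution nums) := by unfold Pre_solution; infer_instance
def pvWitness_solution : List Int := ([1, 2, 4])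

-- On lists with some three positions summing to 0 or 1, A counts that triple (its trial range
-- is empty, so is_prime_number(0) = is_prime_number(1) = True) while B does not, which is
-- intended since 0 and 1 are not prime.
def D_solution (nums : List Int) : Prop := ∃ t ∈ nums.sublistsLen 3, t.sum = 0 ∨ t.sum = 1
instance (nums : List Int) : Decidable (D_solution nums) := by unfold D_solution; infer_instance

def Spec_solution (nums : List Int) (out : Int) : Prop := ¬ D_solution nums → out = solution_alt nums
instance (nums : List Int) (out : Int) : Decidable (Spec_solution nums out) := by unfold Spec_solution; infer_instance

def pvDiffWitness_solution : List Int := ([0, 0, 0])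
def pvDiffWitnessOut_solution : Int × Int := (1, 0)

-- ===== CLAIM (what is proved, stated in full; the proofs are below) =====
def Claim_unchanged_solution : Prop := ∀ (nums : List Int), Dom_solution nums → Pre_solution nums → Spec_solution nums (solution nums)
def Claim_changed_solution : Prop := Dom_solution (pvDiffWitness_solution) ∧ Pre_solution (pvDiffWitness_solution) ∧ D_solution (pvDiffWitness_solution) ∧ solution (pvDiffWitness_solution) = pvDiffWitnessOut_solution.1 ∧ solution_alt (pvDiffWitness_solution) = pvDiffWitnessOut_solution.2 ∧ pvDiffWitnessOut_solution.1 ≠ pvDiffWitnessOut_solution.2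
def Claim_exact_solution : Prop := ∀ (nums : List Int), Dom_solution nums → Pre_solution nums → D_solution nums → solution nums ≠ solution_alt nums

-- ===== LEMMAS AND PROOFS =====

-- proof-layer lists of all pair sums nums[i]+nums[j] (i < j) and triple sums (i < j < k)
def sums2 : List Int → List Int
  | [] => []
  | y :: r => r.map (fun z => y + z) ++ sums2 r

def sums3 : List Int → List Int
  | [] => []
  | x :: r => (sums2 r).map (fun s => x + s) ++ sums3 r

lemma pvMem2 : ∀ (l : List Int) (s : Int), s ∈ sums2 l ↔ ∃ t ∈ l.sublistsLen 2, t.sum = s := by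
  intro l
  induction l with
  | nil => intro s; simp [sums2]
  | cons y r ih =>
      intro s
      simp only [sums2]
      constructor
      · intro hs
        rcases List.mem_append.mp hs with hmap | htail
        · obtain ⟨z, hz, rfl⟩ := List.mem_map.mp hmap
          exact ⟨[y, z], List.mem_sublistsLen.mpr
            ⟨List.Sublist.cons₂ y (List.singleton_sublist.mpr hz), rfl⟩, by simp⟩
        · obtain ⟨t, ht, rfl⟩ := (ih _).mp htail
          obtain ⟨hsub, hlen⟩ := List.mem_sublistsLen.mp ht
          exact ⟨t, List.mem_sublistsLen.mpr ⟨List.Sublist.cons y hsub, hlen⟩, rfl⟩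
      · rintro ⟨t, ht, rfl⟩
        obtain ⟨hsub, hlen⟩ := List.mem_sublistsLen.mp ht
        rcases List.sublist_cons_iff.mp hsub with h | ⟨u, rfl, hu⟩
        · exact List.mem_append.mpr (Or.inr ((ih _).mpr
            ⟨t, List.mem_sublistsLen.mpr ⟨h, hlen⟩, rfl⟩))
        · have h1 : u.length = 1 := by simpa using hlen
          obtain ⟨z, rfl⟩ := List.length_eq_one_iff.mp h1
          exact List.mem_append.mpr (Or.inl (List.mem_map.mpr
            ⟨z, List.singleton_sublist.mp hu, by simp⟩))

lemma pvMem3 : ∀ (l : List Int) (s : Int), s ∈ sums3 l ↔ ∃ t ∈ l.sublistsLen 3, t.sum = s := by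
  intro l
  induction l with
  | nil => intro s; simp [sums3]
  | cons x r ih =>
      intro s
      simp only [sums3]
      constructor
      · intro hs
        rcases List.mem_append.mp hs with hmap | htail
        · obtain ⟨z, hz, rfl⟩ := List.mem_map.mp hmap
          obtain ⟨t, ht, rfl⟩ := (pvMem2 r z).mp hz
          obtain ⟨hsub, hlen⟩ := List.mem_sublistsLen.mp ht
          exact ⟨x :: t, List.mem_sublistsLen.mpr
            ⟨List.Sublist.cons₂ x hsub, by simp [hlen]⟩, by simp⟩
        · obtain ⟨t, ht, rfl⟩ := (ih _).mp htail
          obtain ⟨hsub, hlen⟩ := List.mem_sublistsLen.mp ht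
          exact ⟨t, List.mem_sublistsLen.mpr ⟨List.Sublist.cons x hsub, hlen⟩, rfl⟩
      · rintro ⟨t, ht, rfl⟩
        obtain ⟨hsub, hlen⟩ := List.mem_sublistsLen.mp ht
        rcases List.sublist_cons_iff.mp hsub with h | ⟨u, rfl, hu⟩
        · exact List.mem_append.mpr (Or.inr ((ih _).mpr
            ⟨t, List.mem_sublistsLen.mpr ⟨h, hlen⟩, rfl⟩))
        · have h2 : u.length = 2 := by simpa using hlen
          exact List.mem_append.mpr (Or.inl (List.mem_map.mpr
            ⟨u.sum, (pvMem2 r u.sum).mpr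
              ⟨u, List.mem_sublistsLen.mpr ⟨hu, h2⟩, rfl⟩, by simp⟩))

lemma pvFoldlId {A : Type} (l : List Int) (f : A → Int → A) (acc : A)
    (h : ∀ a : A, ∀ x ∈ l, f a x = a) : l.foldl f acc = acc := by
  induction l generalizing acc with
  | nil => rfl
  | cons x t ih => simp only [List.foldl_cons, h acc x (by simp)]
                   exact ih acc (fun a x hx => h a x (by simp [hx]))

-- structural companion of an index loop that sees, at each position, the element and the suffix after it
def overSuffixes {A : Type} (h : A → Int → List Int → A) : List Int → A → A
  | [], acc => acc
  | x :: r, acc => overSuffixes h r (h acc x r)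

lemma pvFoldSuff {A : Type} (xs : List Int) (h : A → Int → List Int → A) (k : Nat) :
    ∀ (a : Int) (acc : A), 0 ≤ a → xs.length - a.toNat = k →
    (PySem.List.pyRange a (xs.length : Int) 1).foldl
      (fun acc j => h acc (PySem.List.pyGetD xs j 0) (xs.drop (j + 1).toNat)) acc
    = overSuffixes h (xs.drop a.toNat) acc := by
  induction k with
  | zero =>
      intro a acc ha hk
      rw [PySem.List.pyRange_one_eq_nil (by omega), List.drop_eq_nil_of_le (by omega)]
      rfl
  | succ m ih =>
      intro a acc ha hk
      have hlt : a < (xs.length : Int) := by omega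
      have hnat : a.toNat < xs.length := by omega
      rw [PySem.List.pyRange_one_cons hlt, List.foldl_cons,
          List.drop_eq_getElem_cons hnat, overSuffixes,
          PySem.List.pyGetD_eq_getElem xs 0 ha hlt,
          show ((a : Int) + 1).toNat = a.toNat + 1 by omega]
      have hrec := ih (a + 1) (h acc xs[a.toNat] (xs.drop (a.toNat + 1))) (by omega) (by omega)
      rw [show ((a : Int) + 1).toNat = a.toNat + 1 by omega] at hrec
      exact hrec

lemma pvLvl2 (p : Int → Bool) (x : Int) (l : List Int) (acc : Int) :
    overSuffixes (fun acc2 y rest2 =>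
        rest2.foldl (fun a z => if p (x + y + z) then a + 1 else a) acc2) l acc
    = acc + (((sums2 l).countP (fun s => p (x + s)) : Nat) : Int) := by
  induction l generalizing acc with
  | nil => simp [overSuffixes, sums2]
  | cons y t ih =>
      have hfun : (fun z => p (x + (y + z))) = (fun z => p (x + y + z)) := by
        funext z; rw [← add_assoc]
      rw [overSuffixes, ih, PySem.List.foldl_count_if]
      simp only [sums2, List.countP_append, List.countP_map, Function.comp_def, hfun]
      push_cast; ring

lemma pvLvl3 (p : Int → Bool) (l : List Int) (acc : Int) :
    overSuffixes (fun acc x rest =>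
      overSuffixes (fun acc2 y rest2 =>
        rest2.foldl (fun a z => if p (x + y + z) then a + 1 else a) acc2) rest acc) l acc
    = acc + (((sums3 l).countP p : Nat) : Int) := by
  induction l generalizing acc with
  | nil => simp [overSuffixes, sums3]
  | cons x t ih =>
      rw [overSuffixes, ih, pvLvl2]
      simp only [sums3, List.countP_append, List.countP_map, Function.comp_def]
      push_cast; ring

-- A counts isPrimeA over all triple sums
lemma pvACount (nums : List Int) : solution nums = (((sums3 nums).countP isPrimeA : Nat) : Int) := by
  have hmidfull_id : ∀ (i acc : Int), (nums.length : Int) - 2 ≤ i →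
      (PySem.List.pyRange (i + 1) (nums.length : Int) 1).foldl
        (fun ans j => (PySem.List.pyRange (j + 1) (nums.length : Int) 1).foldl
          (fun ans k => if isPrimeA (PySem.List.pyGetD nums i 0 + PySem.List.pyGetD nums j 0
              + PySem.List.pyGetD nums k 0) then ans + 1 else ans) ans) acc = acc := by
    intro i acc hi
    apply pvFoldlId
    intro a j hj
    have hm := PySem.List.mem_pyRange_one.mp hj
    rw [PySem.List.pyRange_one_eq_nil (by omega : (nums.length : Int) ≤ j + 1)]
    rfl
  simp only [solution, PySem.List.len_eq]
  trans ((PySem.List.pyRange 0 ((nums.length : Int) - 2) 1).foldl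
      (fun ans i => (PySem.List.pyRange (i + 1) (nums.length : Int) 1).foldl
        (fun ans j => (PySem.List.pyRange (j + 1) (nums.length : Int) 1).foldl
          (fun ans k => if isPrimeA (PySem.List.pyGetD nums i 0 + PySem.List.pyGetD nums j 0
              + PySem.List.pyGetD nums k 0) then ans + 1 else ans) ans) ans) 0)
  · -- extend the middle range from n-1 to n: the extra iteration j = n-1 has an empty inner range
    apply PySem.List.foldl_congr_mem
    intro acc i _
    by_cases hc : i + 1 ≤ (nums.length : Int) - 1
    · rw [PySem.List.pyRange_one_append (i + 1) ((nums.length : Int) - 1) (nums.length : Int) hc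
          (by omega), List.foldl_append,
        PySem.List.pyRange_one_cons (show (nums.length : Int) - 1 < (nums.length : Int) by omega),
        PySem.List.pyRange_one_eq_nil (show (nums.length : Int) ≤ (nums.length : Int) - 1 + 1 by omega)]
      simp only [List.foldl_cons, List.foldl_nil]
      rw [PySem.List.pyRange_one_eq_nil (show (nums.length : Int) ≤ (nums.length : Int) - 1 + 1 by omega)]
      rfl
    · rw [PySem.List.pyRange_one_eq_nil (by omega : (nums.length : Int) - 1 ≤ i + 1),
          PySem.List.pyRange_one_eq_nil (by omega : (nums.length : Int) ≤ i + 1)]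
  trans ((PySem.List.pyRange 0 (nums.length : Int) 1).foldl
      (fun ans i => (PySem.List.pyRange (i + 1) (nums.length : Int) 1).foldl
        (fun ans j => (PySem.List.pyRange (j + 1) (nums.length : Int) 1).foldl
          (fun ans k => if isPrimeA (PySem.List.pyGetD nums i 0 + PySem.List.pyGetD nums j 0
              + PySem.List.pyGetD nums k 0) then ans + 1 else ans) ans) ans) 0)
  · -- extend the outer range from n-2 to n: the extra iterations are the identity
    by_cases h2 : (0 : Int) ≤ (nums.length : Int) - 2
    · rw [PySem.List.pyRange_one_append 0 ((nums.length : Int) - 2) (nums.length : Int) h2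
          (by omega), List.foldl_append,
        pvFoldlId (PySem.List.pyRange ((nums.length : Int) - 2) (nums.length : Int) 1) _ _
          (fun a i hi => hmidfull_id i a (PySem.List.mem_pyRange_one.mp hi).1)]
    · rw [PySem.List.pyRange_one_eq_nil (by omega : (nums.length : Int) - 2 ≤ 0),
        pvFoldlId (PySem.List.pyRange 0 (nums.length : Int) 1) _ (0 : Int)
          (fun a i hi => hmidfull_id i a
            (by have := (PySem.List.mem_pyRange_one.mp hi).1; omega))]
      rfl
  trans ((PySem.List.pyRange 0 (nums.length : Int) 1).foldl
      (fun ans i => overSuffixes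
        (fun acc2 y rest2 => rest2.foldl
          (fun a z => if isPrimeA (PySem.List.pyGetD nums i 0 + y + z) then a + 1 else a) acc2)
        (nums.drop (i + 1).toNat) ans) 0)
  · -- turn the two inner index loops into structural recursion over suffixes
    apply PySem.List.foldl_congr_mem
    intro acc i hi
    trans ((PySem.List.pyRange (i + 1) (nums.length : Int) 1).foldl
        (fun ans j => (nums.drop (j + 1).toNat).foldl
          (fun a z => if isPrimeA (PySem.List.pyGetD nums i 0 + PySem.List.pyGetD nums j 0 + z)
            then a + 1 else a) ans) acc)
    · apply PySem.List.foldl_congr_mem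
      intro acc2 j hj
      exact PySem.List.foldl_pyRange_pyGetD' nums 0
        (fun a z => if isPrimeA (PySem.List.pyGetD nums i 0 + PySem.List.pyGetD nums j 0 + z)
          then a + 1 else a) acc2
        (by have := (PySem.List.mem_pyRange_one.mp hj).1
            have := (PySem.List.mem_pyRange_one.mp hi).1; omega)
    · exact pvFoldSuff nums
        (fun acc y rest => rest.foldl
          (fun a z => if isPrimeA (PySem.List.pyGetD nums i 0 + y + z) then a + 1 else a) acc)
        (nums.length - (i + 1).toNat) (i + 1) acc
        (by have := (PySem.List.mem_pyRange_one.mp hi).1; omega) rfl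
  trans (overSuffixes
      (fun acc x rest => overSuffixes
        (fun acc2 y rest2 => rest2.foldl
          (fun a z => if isPrimeA (x + y + z) then a + 1 else a) acc2) rest acc)
      (nums.drop ((0 : Int).toNat)) 0)
  · exact pvFoldSuff nums
      (fun acc x rest => overSuffixes
        (fun acc2 y rest2 => rest2.foldl
          (fun a z => if isPrimeA (x + y + z) then a + 1 else a) acc2) rest acc)
      nums.length 0 0 le_rfl (by simp)
  · simp only [Int.toNat_zero, List.drop_zero]
    rw [pvLvl3]
    omega

-- countP facts for the B side
lemma pvSums2Append (l : List Int) (x : Int) (q : Int → Bool) :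
    (sums2 (l ++ [x])).countP q = (sums2 l).countP q + l.countP (fun y => q (y + x)) := by
  induction l with
  | nil => simp [sums2]
  | cons y t ih =>
      simp only [List.cons_append, sums2, List.map_append, List.countP_append, List.countP_map,
        List.map_cons, List.map_nil, List.countP_cons, List.countP_nil, ih, Function.comp_def]
      omega

lemma pvSums3Append (l : List Int) (x : Int) (p : Int → Bool) :
    (sums3 (l ++ [x])).countP p = (sums3 l).countP p + (sums2 l).countP (fun s => p (s + x)) := by
  induction l with
  | nil => simp [sums3, sums2]
  | cons y t ih =>
      have hfun : (fun z => p (y + (z + x))) = (fun z => p (y + z + x)) := by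
        funext z; rw [← add_assoc]
      simp only [List.cons_append, sums3, List.countP_append, List.countP_map, ih,
        pvSums2Append, Function.comp_def, sums2, hfun]
      omega

lemma pvBInv (rest : List Int) :
    ∀ (pre : List Int) (ans : Int) (pairs : List Int),
    (∀ q : Int → Bool, pairs.countP q = (sums2 pre).countP q) →
    ans = (((sums3 pre).countP isPrimeB : Nat) : Int) →
    (rest.foldl
      (fun (st : Int × List Int × List Int) x =>
        (st.2.1.foldl (fun a s => if isPrimeB (s + x) then a + 1 else a) st.1,
         st.2.1 ++ st.2.2.map (fun s => s + x),
         st.2.2 ++ [x]))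
      (ans, pairs, pre)).1 = (((sums3 (pre ++ rest)).countP isPrimeB : Nat) : Int) := by
  induction rest with
  | nil => intro pre ans pairs _ hans; simpa using hans
  | cons x rest ih =>
      intro pre ans pairs hpairs hans
      have h1 : ∀ q : Int → Bool,
          (pairs ++ pre.map (fun s => s + x)).countP q = (sums2 (pre ++ [x])).countP q := by
        intro q
        rw [List.countP_append, hpairs q, List.countP_map, pvSums2Append]
        simp [Function.comp_def]
      have h2 : pairs.foldl (fun a s => if isPrimeB (s + x) then a + 1 else a) ans
          = (((sums3 (pre ++ [x])).countP isPrimeB : Nat) : Int) := by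
        rw [PySem.List.foldl_count_if, hans, hpairs, pvSums3Append]; push_cast; ring
      have h3 := ih (pre ++ [x])
        (pairs.foldl (fun a s => if isPrimeB (s + x) then a + 1 else a) ans)
        (pairs ++ pre.map (fun s => s + x)) h1 h2
      simp only [List.foldl_cons]
      rw [show pre ++ x :: rest = (pre ++ [x]) ++ rest by simp]
      exact h3

lemma pvBCount (nums : List Int) : solution_alt nums = (((sums3 nums).countP isPrimeB : Nat) : Int) := by
  have h := pvBInv nums [] 0 [] (fun q => by simp [sums2]) (by simp [sums3])
  simpa [solution_alt] using h

lemma pvPrimeAgree (s : Int) (hs : 2 ≤ s) : isPrimeA s = isPrimeB s := by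
  simp [isPrimeA, isPrimeB, hs]

lemma pvCountPLt (p q : Int → Bool) : ∀ (l : List Int),
    (∀ a ∈ l, q a = true → p a = true) →
    ∀ w ∈ l, p w = true → q w = false → l.countP q < l.countP p := by
  intro l
  induction l with
  | nil => intro _ w hw; cases hw
  | cons a t ih =>
      intro hle w hw hp hq
      have hta : ∀ b ∈ t, q b = true → p b = true := fun b hb => hle b (List.mem_cons_of_mem _ hb)
      have hhead : (if q a = true then 1 else 0) ≤ (if p a = true then 1 else 0) := by
        by_cases h : q a = true
        · simp [h, hle a (by simp) h]
        · simp [h]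
      rcases List.mem_cons.mp hw with rfl | hwt
      · have hmono := List.countP_mono_left hta
        simp [hp, hq]
        omega
      · have hlt := ih hta w hwt hp hq
        simp only [List.countP_cons]
        omega

-- ===== VERDICT (by name: the statement is the Claim_ definition above) =====
theorem solution_spec : Claim_unchanged_solution := by
  intro nums _ hpre
  unfold Spec_solution
  intro hnd
  rw [pvACount, pvBCount]
  have hag : ∀ s ∈ sums3 nums, isPrimeA s = true ↔ isPrimeB s = true := by
    intro s hs
    obtain ⟨t, ht, rfl⟩ := (pvMem3 nums s).mp hs
    have h0 := hpre t ht
    have h1 : ¬(t.sum = 0 ∨ t.sum = 1) := fun h => hnd ⟨t, ht, h⟩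
    rw [pvPrimeAgree t.sum (by omega)]
  rw [List.countP_congr hag]

theorem solution_changed : Claim_changed_solution := by
  unfold Claim_changed_solution; decide

theorem solution_tight : Claim_exact_solution := by
  intro nums _ hpre hd
  obtain ⟨t0, ht0, hval⟩ := hd
  have hs0 : t0.sum ∈ sums3 nums := (pvMem3 nums t0.sum).mpr ⟨t0, ht0, rfl⟩
  rw [pvACount, pvBCount]
  intro heq
  have hle : ∀ a ∈ sums3 nums, isPrimeB a = true → isPrimeA a = true := by
    intro a _ hb
    have h2 : 2 ≤ a := by
      have := of_decide_eq_true (Bool.and_elim_left hb)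
      exact this
    rw [pvPrimeAgree a h2]; exact hb
  have hp : isPrimeA t0.sum = true := by rcases hval with h | h <;> rw [h] <;> decide
  have hq : isPrimeB t0.sum = false := by rcases hval with h | h <;> rw [h] <;> decide
  have hlt := pvCountPLt isPrimeA isPrimeB (sums3 nums) hle t0.sum hs0 hp hq
  omega
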